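-- pv_equiv track=rewrite | github.com/SKNIRBHAY/Small_Innovative_Projects_in_Python | SecretLetters.py | reverseStringButPreserveWhiteSpace
-- ===== SOURCE A (Python) =====
-- def reverseStringButPreserveWhiteSpace(Sentance):
--     listofWord = Sentance.split(' ');
--     result = '';
--     for word in listofWord:
--         if(word != ''):
--             temp = '';
--             for j in range((len(word)-1),-1,-1):
--                 temp = temp + word[j];
--             result = result + temp + ' ';
--         else:
--             result = result + ' ';
--     return result;
-- ===== SOURCE B (Python) =====
-- def reverseStringButPreserveWhiteSpace(Sentance):
--     # One left-to-right pass with a current-word buffer; no split list is built.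
--     result = ''
--     buf = ''
--     for ch in Sentance:
--         if ch == ' ':
--             result += buf[::-1] + ' '
--             buf = ''
--         else:
--             buf += ch
--     return result + buf[::-1] + ' '
-- ===== Notes on version B (the rewrite author's own statement) =====
-- stated objective: alternative
-- what changed: Replaces a split on single spaces plus a nested index loop that reverses each word character-by-character with a single left-to-right pass over the characters maintaining a current-word buffer that is flushed reversed at each space and once at the end.
import Mathlib
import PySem

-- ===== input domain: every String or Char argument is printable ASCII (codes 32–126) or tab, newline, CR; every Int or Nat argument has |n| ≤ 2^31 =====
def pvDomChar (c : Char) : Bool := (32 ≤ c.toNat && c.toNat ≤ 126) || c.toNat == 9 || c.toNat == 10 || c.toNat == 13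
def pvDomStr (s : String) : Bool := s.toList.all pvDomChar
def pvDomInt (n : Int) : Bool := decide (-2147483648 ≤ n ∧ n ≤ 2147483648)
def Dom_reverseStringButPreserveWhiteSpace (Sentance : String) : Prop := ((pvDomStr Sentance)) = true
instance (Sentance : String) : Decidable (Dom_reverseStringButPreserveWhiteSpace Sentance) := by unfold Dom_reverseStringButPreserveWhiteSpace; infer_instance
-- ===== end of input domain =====

-- B does one pass with a current-word buffer instead of splitting on spaces and reversing each word with a nested index loop; same result.

-- ===== PORT A =====
def reverseStringButPreserveWhiteSpace (Sentance : String) : String :=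
  let listofWord := PySem.Chars.splitOn Sentance.toList [' ']
  let result := listofWord.foldl (fun result word =>
    if word ≠ [] then
      let temp := (PySem.List.pyRange ((word.length : Int) - 1) (-1) (-1)).foldl
        (fun temp j => temp ++ [PySem.List.pyGetD word j ' ']) []
      result ++ temp ++ [' ']
    else
      result ++ [' ']) []
  String.ofList result

-- ===== PORT B =====
def reverseStringButPreserveWhiteSpace_alt (Sentance : String) : String :=
  let st := Sentance.toList.foldl (fun (st : List Char × List Char) ch =>
    if ch = ' ' then (st.1 ++ st.2.reverse ++ [' '], [])
    else (st.1, st.2 ++ [ch])) ([], [])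
  String.ofList (st.1 ++ st.2.reverse ++ [' '])

-- ===== PRECONDITION & SPEC =====
def Spec_reverseStringButPreserveWhiteSpace (Sentance : String) (out : String) : Prop := out = reverseStringButPreserveWhiteSpace_alt Sentance
instance (Sentance : String) (out : String) : Decidable (Spec_reverseStringButPreserveWhiteSpace Sentance out) := by unfold Spec_reverseStringButPreserveWhiteSpace; infer_instance

-- ===== CLAIM (what is proved, stated in full; the proofs are below) =====
def Claim_equal_reverseStringButPreserveWhiteSpace : Prop := ∀ (Sentance : String), Dom_reverseStringButPreserveWhiteSpace Sentance → Spec_reverseStringButPreserveWhiteSpace Sentance (reverseStringButPreserveWhiteSpace Sentance)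

-- ===== LEMMAS AND PROOFS =====

-- reference split on a single space, structural recursion
def pvSplitSp : List Char → List (List Char)
  | [] => [[]]
  | c :: rest => if c = ' ' then [] :: pvSplitSp rest else (pvSplitSp rest).modifyHead (c :: ·)

theorem pvSplitSp_ne_nil (l : List Char) : pvSplitSp l ≠ [] := by
  induction l with
  | nil => simp [pvSplitSp]
  | cons c rest ih =>
    simp only [pvSplitSp]
    split_ifs
    · simp
    · cases h : pvSplitSp rest with
      | nil => exact absurd h ih
      | cons a t => simp

theorem pvGo_eq (fuel : Nat) (l cur : List Char) (acc : List (List Char))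
    (h : l.length < fuel) :
    PySem.Chars.splitOn.go [' '] fuel l cur acc
      = acc.reverse ++ (pvSplitSp l).modifyHead (cur.reverse ++ ·) := by
  induction l generalizing fuel cur acc with
  | nil =>
    cases fuel with
    | zero => omega
    | succ f => simp [PySem.Chars.splitOn.go, pvSplitSp, List.modifyHead]
  | cons c rest ih =>
    cases fuel with
    | zero => omega
    | succ f =>
      by_cases hc : c = ' '
      · subst hc
        rw [PySem.Chars.splitOn.go]
        simp only [List.isPrefixOf, List.length]
        rw [if_pos (by simp)]
        simp only [List.drop]
        rw [ih f [] (cur.reverse :: acc) (by simpa using Nat.lt_of_succ_lt_succ h)]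
        simp [pvSplitSp, List.modifyHead]
        cases hr : pvSplitSp rest with
        | nil => exact absurd hr (pvSplitSp_ne_nil rest)
        | cons a t => simp
      · rw [PySem.Chars.splitOn.go]
        rw [if_neg (by simp [List.isPrefixOf]; intro hh; exact hc hh.symm)]
        rw [ih f (c :: cur) acc (by simpa using Nat.lt_of_succ_lt_succ h)]
        simp only [pvSplitSp, if_neg hc]
        cases hr : pvSplitSp rest with
        | nil => exact absurd hr (pvSplitSp_ne_nil rest)
        | cons a t => simp [List.modifyHead]

theorem pvSplitOn_space (l : List Char) :
    PySem.Chars.splitOn l [' '] = pvSplitSp l := by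
  unfold PySem.Chars.splitOn
  rw [pvGo_eq (l.length + 1) l [] [] (by omega)]
  cases hr : pvSplitSp l with
  | nil => exact absurd hr (pvSplitSp_ne_nil l)
  | cons a t => simp

-- generic: appending one image per element is map
theorem pvFoldl_snoc {α β : Type} (h : β → α) (l : List β) (init : List α) :
    l.foldl (fun acc x => acc ++ [h x]) init = init ++ l.map h := by
  induction l generalizing init with
  | nil => simp
  | cons x xs ih => simp [List.foldl, ih]

-- A's inner countdown loop reverses the word
theorem pvInner_eq (word : List Char) :
    (PySem.List.pyRange ((word.length : Int) - 1) (-1) (-1)).foldl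
      (fun temp j => temp ++ [PySem.List.pyGetD word j ' ']) [] = word.reverse := by
  rw [pvFoldl_snoc]
  have h1 : PySem.List.pyRange ((word.length : Int) - 1) (-1) (-1)
      = (PySem.List.pyRange 0 (word.length : Int) 1).reverse := by
    rw [PySem.List.pyRange_neg_one_eq_reverse]; norm_num
  rw [h1, List.map_reverse]
  have h2 : (PySem.List.pyRange 0 (word.length : Int) 1).map
      (fun j => PySem.List.pyGetD word j ' ') = word := by
    simpa using PySem.List.map_pyGetD_pyRange_zero' word ' '
  rw [h2]
  simp

-- fold of "reversed word plus space" pulled out of its initial accumulator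
def pvF : List (List Char) → List Char
  | [] => []
  | w :: ws => w.reverse ++ ' ' :: pvF ws

theorem pvFoldl_F (ws : List (List Char)) (r : List Char) :
    ws.foldl (fun r w => r ++ w.reverse ++ [' ']) r = r ++ pvF ws := by
  induction ws generalizing r with
  | nil => simp [pvF]
  | cons w t ih =>
    simp only [List.foldl]
    rw [ih]
    simp [pvF]

-- the B-side step
def pvStep : List Char × List Char → Char → List Char × List Char :=
  fun st ch => if ch = ' ' then (st.1 ++ st.2.reverse ++ [' '], []) else (st.1, st.2 ++ [ch])

theorem pvB_eq (l : List Char) (r buf : List Char) :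
    (l.foldl pvStep (r, buf)).1 ++ (l.foldl pvStep (r, buf)).2.reverse ++ [' ']
      = r ++ pvF ((pvSplitSp l).modifyHead (buf ++ ·)) := by
  induction l generalizing r buf with
  | nil => simp [pvSplitSp, List.modifyHead, pvF]
  | cons c rest ih =>
    by_cases hc : c = ' '
    · subst hc
      simp only [List.foldl, pvStep]
      rw [ih]
      simp only [pvSplitSp, List.modifyHead]
      cases hr : pvSplitSp rest with
      | nil => exact absurd hr (pvSplitSp_ne_nil rest)
      | cons a t => simp [pvF]
    · simp only [List.foldl, pvStep, if_neg hc]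
      rw [ih]
      simp only [pvSplitSp, if_neg hc]
      cases hr : pvSplitSp rest with
      | nil => exact absurd hr (pvSplitSp_ne_nil rest)
      | cons a t => simp [List.modifyHead, pvF]

theorem pvA_fun_eq : (fun (result word : List Char) =>
    if word ≠ [] then
      result ++ ((PySem.List.pyRange ((word.length : Int) - 1) (-1) (-1)).foldl
        (fun temp j => temp ++ [PySem.List.pyGetD word j ' ']) []) ++ [' ']
    else result ++ [' '])
    = fun r w => r ++ w.reverse ++ [' '] := by
  funext r w
  by_cases hw : w = []
  · subst hw; simp
  · rw [if_pos hw, pvInner_eq]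

-- ===== VERDICT (by name: the statement is the Claim_ definition above) =====
theorem reverseStringButPreserveWhiteSpace_spec : Claim_equal_reverseStringButPreserveWhiteSpace := by
  intro s _
  unfold Spec_reverseStringButPreserveWhiteSpace
  unfold reverseStringButPreserveWhiteSpace reverseStringButPreserveWhiteSpace_alt
  simp only [pvSplitOn_space, pvA_fun_eq]
  have hstep : (fun (st : List Char × List Char) ch =>
      if ch = ' ' then (st.1 ++ st.2.reverse ++ [' '], [])
      else (st.1, st.2 ++ [ch])) = pvStep := rfl
  rw [hstep]
  congr 1
  rw [pvFoldl_F, pvB_eq]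
  cases hr : pvSplitSp s.toList with
  | nil => exact absurd hr (pvSplitSp_ne_nil s.toList)
  | cons a t => simp [List.modifyHead]
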